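-- pv_equiv track=rewrite | github.com/AMV007/raspberry_house_control | common/speech/decimal_to_text_ru.py | text_num_split
-- ===== SOURCE A (Python) =====
-- import string
--
-- def is_digit(s):
--     if not s[0].isnumeric():
--         return False
--
--     if s.count('.') + s.count(',') > 1:
--         return False
--
--     for ch in s:
--         if ch not in string.digits and ch != '.' and ch != ',':
--             return False
--     return True
--
-- def text_num_split(item):
--     groups = []
--     newword = ""
--     digit_found=False
--     for index, letter in enumerate(item, 0):
--         if is_digit(newword+letter):
--             if not digit_found:
--                 if newword: groups.append(newword)
--                 newword=""
--                 digit_found=True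
--         else:
--             if digit_found:
--                 if newword: groups.append(newword)
--                 newword=""
--                 digit_found=False
--         newword += letter
--     if newword: groups.append(newword)
--     return groups
-- ===== SOURCE B (Python) =====
-- import string
--
-- def text_num_split(item):
--     # A splits off at most one group: the maximal numeric token (digits with at
--     # most one '.' or ',') at the very start; everything after it stays one group.
--     if not item:
--         return []
--     if not item[0].isnumeric():
--         return [item]
--     seps = 0
--     i = 0
--     n = len(item)
--     while i < n:
--         ch = item[i]
--         if ch == '.' or ch == ',':
--             if seps == 1:
--                 break
--             seps += 1
--         elif ch not in string.digits:
--             break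
--         i += 1
--     rest = item[i:]
--     return [item[:i]] + ([rest] if rest else [])
-- ===== Notes on version B (the rewrite author's own statement) =====
-- stated objective: faster
-- what changed: A re-runs is_digit on the whole growing word at every character (quadratic on numeric prefixes); B does one linear scan that peels the maximal leading numeric token (digits with at most one '.' or ',') and returns the remainder as the single other group, which is all A's automaton can ever produce since digit mode is only reachable at position 0.
import Mathlib
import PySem

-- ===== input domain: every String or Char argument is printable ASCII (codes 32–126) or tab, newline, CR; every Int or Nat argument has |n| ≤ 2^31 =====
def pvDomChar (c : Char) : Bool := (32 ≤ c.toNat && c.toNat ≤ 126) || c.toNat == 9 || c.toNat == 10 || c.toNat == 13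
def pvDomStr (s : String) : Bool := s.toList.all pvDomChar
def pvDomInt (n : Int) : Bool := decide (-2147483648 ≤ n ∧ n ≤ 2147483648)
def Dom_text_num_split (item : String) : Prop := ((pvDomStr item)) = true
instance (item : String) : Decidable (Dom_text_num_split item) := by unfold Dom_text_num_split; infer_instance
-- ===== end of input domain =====

-- B replaces A's grow-and-recheck loop (is_digit rescans the growing word each step)
-- by one linear scan that peels the maximal leading numeric token; return value only.

-- ===== PORT A =====
-- is_digit(s); Python raises IndexError on "" at s[0], but every call site passes a
-- nonempty string, so the [] branch (false) is unreachable.  On the ASCII domain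
-- str.isnumeric coincides with Char.isDigit, and s.count('.') of a 1-char pattern
-- is List.count.
def pyIsDigitTok (s : List Char) : Bool :=
  match s with
  | [] => false
  | c :: _ =>
    if !c.isDigit then false
    else if s.count '.' + s.count ',' > 1 then false
    else s.all (fun ch => ch.isDigit || ch == '.' || ch == ',')

-- the body of A's for-loop, state = (groups, newword, digit_found)
def tnsStep (st : List String × List Char × Bool) (letter : Char) :
    List String × List Char × Bool :=
  let groups := st.1
  let newword := st.2.1
  let digit_found := st.2.2
  if pyIsDigitTok (newword ++ [letter]) then
    if !digit_found then
      ((if newword ≠ [] then groups ++ [String.ofList newword] else groups), [letter], true)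
    else (groups, newword ++ [letter], true)
  else
    if digit_found then
      ((if newword ≠ [] then groups ++ [String.ofList newword] else groups), [letter], false)
    else (groups, newword ++ [letter], false)

def text_num_split (item : String) : List String :=
  let st := item.toList.foldl tnsStep ([], [], false)
  if st.2.1 ≠ [] then st.1 ++ [String.ofList st.2.1] else st.1

-- ===== PORT B =====
-- B's while loop: returns (numeric token, rest); seps = separators consumed so far
def tnsScan : List Char → Nat → List Char × List Char
  | [], _ => ([], [])
  | ch :: rest, seps =>
    if ch == '.' || ch == ',' then
      if seps = 1 then ([], ch :: rest)
      else
        let pr := tnsScan rest (seps + 1)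
        (ch :: pr.1, pr.2)
    else if !ch.isDigit then ([], ch :: rest)
    else
      let pr := tnsScan rest seps
      (ch :: pr.1, pr.2)

def text_num_split_alt (item : String) : List String :=
  match item.toList with
  | [] => []
  | c :: _ =>
    if !c.isDigit then [item]
    else
      let pr := tnsScan item.toList 0
      String.ofList pr.1 :: (if pr.2 ≠ [] then [String.ofList pr.2] else [])

-- ===== PRECONDITION & SPEC =====
def Spec_text_num_split (item : String) (out : List String) : Prop := out = text_num_split_alt item
instance (item : String) (out : List String) : Decidable (Spec_text_num_split item out) := by unfold Spec_text_num_split; infer_instance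

-- ===== CLAIM (what is proved, stated in full; the proofs are below) =====
def Claim_equal_text_num_split : Prop := ∀ (item : String), Dom_text_num_split item → Spec_text_num_split item (text_num_split item)

-- ===== LEMMAS AND PROOFS =====

theorem pyIsDigitTok_ne_nil {p : List Char} (h : pyIsDigitTok p = true) : p ≠ [] := by
  intro he; subst he; simp [pyIsDigitTok] at h

theorem tok_parts {c : Char} {t : List Char} (hp : pyIsDigitTok (c :: t) = true) :
    c.isDigit = true ∧ (c :: t).count '.' + (c :: t).count ',' ≤ 1 ∧
      ((c :: t).all fun ch => ch.isDigit || ch == '.' || ch == ',') = true := by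
  simp only [pyIsDigitTok] at hp
  split_ifs at hp with h1 h2
  refine ⟨by simpa using h1, by omega, hp⟩

theorem sep_not_digit {ch : Char} (h : (ch == '.' || ch == ',') = true) :
    ch.isDigit = false := by
  rcases Bool.or_eq_true_iff.mp h with h1 | h1 <;> (cases eq_of_beq h1; decide)

theorem sep_count {ch : Char} (h : (ch == '.' || ch == ',') = true) :
    List.count '.' [ch] + List.count ',' [ch] = 1 := by
  rcases Bool.or_eq_true_iff.mp h with h1 | h1 <;> (cases eq_of_beq h1; decide)

theorem digit_count {ch : Char} (h : ch.isDigit = true) :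
    List.count '.' [ch] + List.count ',' [ch] = 0 := by
  have h1 : ch ≠ '.' := by intro he; subst he; simp at h
  have h2 : ch ≠ ',' := by intro he; subst he; simp at h
  simp [h1, h2]

theorem count2_snoc (l : List Char) (ch : Char) :
    (l ++ [ch]).count '.' + (l ++ [ch]).count ',' =
      l.count '.' + l.count ',' + (List.count '.' [ch] + List.count ',' [ch]) := by
  simp [List.count_append]; omega

theorem head_not_digit_tok {w : List Char} (hw : w ≠ [])
    (hh : (w.headD ' ').isDigit = false) (ch : Char) :
    pyIsDigitTok (w ++ [ch]) = false := by
  cases w with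
  | nil => exact absurd rfl hw
  | cons a t =>
    simp only [List.headD_cons] at hh
    simp [pyIsDigitTok, hh]

-- once in text mode with a non-digit-headed word, A only appends
theorem textAbsorb (l : List Char) : ∀ (groups : List String) (w : List Char), w ≠ [] →
    (w.headD ' ').isDigit = false →
    List.foldl tnsStep (groups, w, false) l = (groups, w ++ l, false) := by
  induction l with
  | nil => intro groups w _ _; simp
  | cons ch rest ih =>
    intro groups w hw hh
    have hstep : tnsStep (groups, w, false) ch = (groups, w ++ [ch], false) := by
      simp [tnsStep, head_not_digit_tok hw hh]
    rw [List.foldl_cons, hstep, ih groups (w ++ [ch]) (by simp)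
      (by cases w with | nil => exact absurd rfl hw | cons a t => simpa using hh)]
    simp

-- extending a valid token: A's membership test matches B's scan test
theorem tok_extend {p : List Char} (hp : pyIsDigitTok p = true) (ch : Char) :
    pyIsDigitTok (p ++ [ch]) =
      (if (ch == '.' || ch == ',') = true then decide (p.count '.' + p.count ',' = 0)
       else ch.isDigit) := by
  cases p with
  | nil => exact absurd hp (by simp [pyIsDigitTok])
  | cons c t =>
    obtain ⟨hc, hcnt, hall⟩ := tok_parts hp
    have hunf : pyIsDigitTok ((c :: t) ++ [ch]) =
        (if !c.isDigit then false
         else if ((c :: t) ++ [ch]).count '.' + ((c :: t) ++ [ch]).count ',' > 1 then false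
         else ((c :: t) ++ [ch]).all fun x => x.isDigit || x == '.' || x == ',') := by
      rfl
    rw [hunf]
    simp only [hc, Bool.not_true, Bool.false_eq_true, if_false]
    rw [count2_snoc]
    by_cases hsep : (ch == '.' || ch == ',') = true
    · rw [if_pos hsep, sep_count hsep]
      by_cases hz : (c :: t).count '.' + (c :: t).count ',' = 0
      · rw [if_neg (by omega)]
        have hchp : (ch.isDigit || ch == '.' || ch == ',') = true := by
          rcases Bool.or_eq_true_iff.mp hsep with h1 | h1 <;> simp [h1]
        rw [List.all_append]
        simp [hall, hchp, hz]
      · rw [if_pos (by omega)]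
        simp
        omega
    · rw [if_neg hsep]
      by_cases hd : ch.isDigit = true
      · rw [digit_count hd, if_neg (by omega), List.all_append]
        simp [hall, hd]
      · have hsep' : (ch == '.') = false ∧ (ch == ',') = false := by
          constructor <;> (cases hb : (ch == _) <;> simp_all)
        have hdf : ch.isDigit = false := by simpa using hd
        have hpred : (ch.isDigit || ch == '.' || ch == ',') = false := by
          simp [hdf, hsep'.1, hsep'.2]
        rw [hdf]
        split_ifs
        · rfl
        · rw [List.all_append]
          simp [hpred]

theorem tok_count_le_one {p : List Char} (hp : pyIsDigitTok p = true) :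
    p.count '.' + p.count ',' ≤ 1 := by
  cases p with
  | nil => exact absurd hp (by simp [pyIsDigitTok])
  | cons c t => exact (tok_parts hp).2.1

-- digit mode: A's fold follows B's scan
theorem digitRun (l : List Char) : ∀ (groups : List String) (p : List Char),
    pyIsDigitTok p = true →
    List.foldl tnsStep (groups, p, true) l =
      (let pr := tnsScan l (p.count '.' + p.count ',')
       if pr.2 = [] then (groups, p ++ pr.1, true)
       else (groups ++ [String.ofList (p ++ pr.1)], pr.2, false)) := by
  induction l with
  | nil => intro groups p hp; simp [tnsScan]
  | cons ch rest ih =>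
    intro groups p hp
    have hpne := pyIsDigitTok_ne_nil hp
    have hext := tok_extend hp ch
    have hcle := tok_count_le_one hp
    by_cases hsep : (ch == '.' || ch == ',') = true
    · by_cases hz : p.count '.' + p.count ',' = 0
      · -- continue, seps+1
        have hT : pyIsDigitTok (p ++ [ch]) = true := by simp [hext, hsep, hz]
        have hcnt : (p ++ [ch]).count '.' + (p ++ [ch]).count ',' = 1 := by
          have := sep_count hsep
          simp [List.count_append] at *; omega
        have hstep : tnsStep (groups, p, true) ch = (groups, p ++ [ch], true) := by
          simp [tnsStep, hT]
        rw [List.foldl_cons, hstep, ih groups (p ++ [ch]) hT, hcnt]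
        have hscan : tnsScan (ch :: rest) (p.count '.' + p.count ',') =
            (ch :: (tnsScan rest 1).1, (tnsScan rest 1).2) := by
          rw [hz]; simp [tnsScan, hsep]
        rw [hscan]
        cases hrr : (tnsScan rest 1).2 <;> simp [hrr]
      · -- seps = 1: break here
        have h1 : p.count '.' + p.count ',' = 1 := by omega
        have hF : pyIsDigitTok (p ++ [ch]) = false := by
          rw [hext, if_pos hsep]; simp; omega
        have hstep : tnsStep (groups, p, true) ch =
            (groups ++ [String.ofList p], [ch], false) := by
          simp [tnsStep, hF, hpne]
        rw [List.foldl_cons, hstep,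
          textAbsorb rest (groups ++ [String.ofList p]) [ch] (by simp)
            (by simpa using sep_not_digit hsep)]
        have hscan : tnsScan (ch :: rest) (p.count '.' + p.count ',') = ([], ch :: rest) := by
          rw [h1]; simp [tnsScan, hsep]
        rw [hscan]
        simp
    · by_cases hd : ch.isDigit = true
      · -- digit: continue, seps unchanged
        have hT : pyIsDigitTok (p ++ [ch]) = true := by simp [hext, hsep, hd]
        have hcnt : (p ++ [ch]).count '.' + (p ++ [ch]).count ',' =
            p.count '.' + p.count ',' := by
          have := digit_count hd
          simp [List.count_append] at *; omega
        have hstep : tnsStep (groups, p, true) ch = (groups, p ++ [ch], true) := by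
          simp [tnsStep, hT]
        rw [List.foldl_cons, hstep, ih groups (p ++ [ch]) hT, hcnt]
        have hscan : tnsScan (ch :: rest) (p.count '.' + p.count ',') =
            (ch :: (tnsScan rest (p.count '.' + p.count ',')).1,
             (tnsScan rest (p.count '.' + p.count ',')).2) := by
          simp [tnsScan, hsep, hd]
        rw [hscan]
        cases hrr : (tnsScan rest (p.count '.' + p.count ',')).2 <;> simp [hrr]
      · -- other char: break here
        have hF : pyIsDigitTok (p ++ [ch]) = false := by simp [hext, hsep, hd]
        have hstep : tnsStep (groups, p, true) ch =
            (groups ++ [String.ofList p], [ch], false) := by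
          simp [tnsStep, hF, hpne]
        rw [List.foldl_cons, hstep,
          textAbsorb rest (groups ++ [String.ofList p]) [ch] (by simp) (by simpa using hd)]
        have hscan : tnsScan (ch :: rest) (p.count '.' + p.count ',') = ([], ch :: rest) := by
          simp [tnsScan, hsep, hd]
        rw [hscan]
        simp

theorem digit_single {c : Char} (hd : c.isDigit = true) : pyIsDigitTok [c] = true := by
  have h1 : c ≠ '.' := by intro he; subst he; simp at hd
  have h2 : c ≠ ',' := by intro he; subst he; simp at hd
  simp [pyIsDigitTok, hd, h1, h2]

-- ===== VERDICT (by name: the statement is the Claim_ definition above) =====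
theorem text_num_split_spec : Claim_equal_text_num_split := by
  intro item _
  unfold Spec_text_num_split text_num_split text_num_split_alt
  cases hl : item.toList with
  | nil => simp
  | cons c cs =>
    by_cases hd : c.isDigit = true
    · -- numeric start
      have h1 : tnsStep ([], [], false) c = ([], [c], true) := by
        simp [tnsStep, digit_single hd]
      have hc0 : List.count '.' [c] + List.count ',' [c] = 0 := digit_count hd
      have hne : (c == '.' || c == ',') = false := by
        have h1 : c ≠ '.' := by intro he; subst he; simp at hd
        have h2 : c ≠ ',' := by intro he; subst he; simp at hd
        simp [h1, h2]
      have hsc : tnsScan (c :: cs) 0 =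
          (c :: (tnsScan cs 0).1, (tnsScan cs 0).2) := by
        simp [tnsScan, hne, hd]
      rw [List.foldl_cons, h1, digitRun cs [] [c] (digit_single hd), hc0]
      simp only [hsc, hd, Bool.not_true, Bool.false_eq_true, if_false]
      cases hrr : (tnsScan cs 0).2 <;> simp
    · -- non-digit start: one text group, the whole string
      have hdf : c.isDigit = false := by simpa using hd
      have h1 : tnsStep ([], [], false) c = ([], [c], false) := by
        simp [tnsStep, pyIsDigitTok, hdf]
      rw [List.foldl_cons, h1, textAbsorb cs [] [c] (by simp) (by simpa using hdf)]
      have hit : String.ofList (c :: cs) = item := by rw [← hl]; simp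
      simp [hdf, hit]
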